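-- pv_equiv track=rewrite | github.com/ivanlikeit/ivanlikeit-INFO_TECHNO_2025 | hSFBHNISDFVHJSIODFVH.py | much
-- ===== SOURCE A (Python) =====
-- spisok = list('abcdefg')
--
-- def much(a):
--     s = ''
--     while a >0:
--         l = str(a%17)
--         if int(l) <=9:
--             s = l+s
--         if int(l) > 9:
--             s = spisok[int(str(l)[1])] + s
--         a=a//17
--     return s
-- ===== SOURCE B (Python) =====
-- def much(a):
--     if a <= 0:
--         return ''
--     return much(a // 17) + '0123456789abcdefg'[a % 17]
-- ===== Notes on version B (the rewrite author's own statement) =====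
-- stated objective: simpler
-- what changed: Replaces the while-loop with string-prepending and the str/int round-trip digit computation by a direct recursion on a//17 that appends a digit looked up in a single lookup string.
import Mathlib
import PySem

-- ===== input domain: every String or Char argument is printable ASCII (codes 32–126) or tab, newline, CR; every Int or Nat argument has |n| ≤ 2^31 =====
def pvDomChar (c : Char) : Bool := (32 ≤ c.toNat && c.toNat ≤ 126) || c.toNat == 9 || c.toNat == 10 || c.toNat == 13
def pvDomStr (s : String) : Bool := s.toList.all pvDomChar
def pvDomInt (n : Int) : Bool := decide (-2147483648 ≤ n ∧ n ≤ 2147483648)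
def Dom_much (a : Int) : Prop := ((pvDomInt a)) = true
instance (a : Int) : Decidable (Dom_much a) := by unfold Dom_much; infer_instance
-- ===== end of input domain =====

-- B replaces A's while-loop (prepend, str/int round-trips, letter table) by a direct
-- recursion on a // 17 appending a digit from one lookup string; objective: simpler.


-- ===== PORT A =====
-- Python's `spisok = list('abcdefg')` (one-char strings kept as Chars; strings are built on List Char throughout).
def spisok : List Char := ['a', 'b', 'c', 'd', 'e', 'f', 'g']

-- termination fact for the while loop, cited by name in decreasing_by
theorem muchLoop_dec (a : Int) (h : 0 < a) :
    (PySem.Int.floordiv a 17).toNat < a.toNat := by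
  rw [PySem.Int.floordiv_eq_ediv_of_pos (by omega : (0:Int) < 17)]
  omega

-- the while loop of A, state = (a, s); `.getD` defaults are unreachable (a % 17 ∈ [0,17) always
-- parses back and indexes in range), matching Python which never raises here
def muchLoop (a : Int) (s : List Char) : List Char :=
  if h : 0 < a then
    let l := PySem.Int.toChars (PySem.Int.mod a 17)          -- l = str(a % 17)
    let s1 := if (PySem.Int.ofChars? l).getD 0 ≤ 9           -- if int(l) <= 9
      then l ++ s else s
    let s2 := if 9 < (PySem.Int.ofChars? l).getD 0 then      -- if int(l) > 9
        (match PySem.Chars.pyGet? l 1 with                   -- str(l)[1]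
         | some c => ((PySem.List.pyGet? spisok ((PySem.Int.ofChars? [c]).getD 0)).getD ' ') :: s1
         | none => s1)
      else s1
    muchLoop (PySem.Int.floordiv a 17) s2                    -- a = a // 17
  else s
termination_by a.toNat
decreasing_by exact muchLoop_dec a h

def much (a : Int) : String := String.mk (muchLoop a [])

-- ===== PORT B =====
def pvDigits : List Char := ['0','1','2','3','4','5','6','7','8','9','a','b','c','d','e','f','g']

-- recursion of Source B; `.getD` default unreachable (a % 17 ∈ [0,17))
def muchAltRec (a : Int) : List Char :=
  if h : a ≤ 0 then []
  else muchAltRec (PySem.Int.floordiv a 17) ++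
    [(PySem.List.pyGet? pvDigits (PySem.Int.mod a 17)).getD ' ']
termination_by a.toNat
decreasing_by exact muchLoop_dec a (by omega)

def much_alt (a : Int) : String := String.mk (muchAltRec a)

-- ===== PRECONDITION & SPEC =====
def Spec_much (a : Int) (out : String) : Prop := out = much_alt a
instance (a : Int) (out : String) : Decidable (Spec_much a out) := by unfold Spec_much; infer_instance

-- ===== CLAIM (what is proved, stated in full; the proofs are below) =====
def Claim_equal_much : Prop := ∀ (a : Int), Dom_much a → Spec_much a (much a)

-- ===== LEMMAS AND PROOFS =====

-- one loop-body step of A produces exactly B's digit, prepended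
theorem step_digit (r : Int) (h0 : 0 ≤ r) (h17 : r < 17) (s : List Char) :
    (let l := PySem.Int.toChars r
     let s1 := if (PySem.Int.ofChars? l).getD 0 ≤ 9 then l ++ s else s
     if 9 < (PySem.Int.ofChars? l).getD 0 then
        (match PySem.Chars.pyGet? l 1 with
         | some c => ((PySem.List.pyGet? spisok ((PySem.Int.ofChars? [c]).getD 0)).getD ' ') :: s1
         | none => s1)
      else s1) =
    ((PySem.List.pyGet? pvDigits r).getD ' ') :: s := by
  interval_cases r <;> rfl

theorem loop_eq (n : Nat) : ∀ (a : Int), a.toNat ≤ n → ∀ (s : List Char),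
    muchLoop a s = muchAltRec a ++ s := by
  induction n with
  | zero =>
    intro a ha s
    have h : ¬ 0 < a := by omega
    rw [muchLoop, muchAltRec]
    simp [h, show a ≤ 0 by omega]
  | succ n ih =>
    intro a ha s
    by_cases h : 0 < a
    · have hr0 : 0 ≤ PySem.Int.mod a 17 := PySem.Int.mod_nonneg a (by omega)
      have hr17 : PySem.Int.mod a 17 < 17 := PySem.Int.mod_lt a (by omega)
      rw [muchLoop]
      simp only [h, dite_true]
      rw [step_digit _ hr0 hr17]
      rw [ih _ (by have := muchLoop_dec a h; omega)]
      conv_rhs => rw [muchAltRec]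
      simp [show ¬ a ≤ 0 by omega]
    · rw [muchLoop, muchAltRec]
      simp [h, show a ≤ 0 by omega]

-- ===== VERDICT (by name: the statement is the Claim_ definition above) =====
theorem much_spec : Claim_equal_much := by
  intro a _
  unfold Spec_much much much_alt
  rw [loop_eq a.toNat a le_rfl []]
  simp
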